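-- pv_equiv track=rewrite | github.com/sgsokol/influx | influx_si/tools_ssg.py | strbit32
-- ===== SOURCE A (Python) =====
-- def strbit32(i):
--     r""":returns: a string of 0-1s (in chunk of 4) in an 32 bit integer"""
--     i=int(i)
--     moveb=1<<31
--     res=''
--     for b in range(32):
--         res+=str(int((moveb&i) > 0))
--         res+=' ' if not (b+1)%4 and b < 31 else ''
--         moveb>>=1
--     return res
-- ===== SOURCE B (Python) =====
-- _NIB = ('0000', '0001', '0010', '0011', '0100', '0101', '0110', '0111',
--         '1000', '1001', '1010', '1011', '1100', '1101', '1110', '1111')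
--
--
-- def strbit32(i):
--     r""":returns: a string of 0-1s (in chunk of 4) in an 32 bit integer"""
--     n = int(i) & 0xFFFFFFFF
--     return ' '.join(_NIB[(n >> s) & 0xF] for s in range(28, -4, -4))
-- ===== Notes on version B (the rewrite author's own statement) =====
-- stated objective: faster
-- what changed: Replaces the 32-iteration per-bit masking loop (moveb&i test plus string concatenation per bit) with a single 32-bit mask followed by 8 nibble lookups in a precomputed 16-entry table, joined by ' '.
import Mathlib
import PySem

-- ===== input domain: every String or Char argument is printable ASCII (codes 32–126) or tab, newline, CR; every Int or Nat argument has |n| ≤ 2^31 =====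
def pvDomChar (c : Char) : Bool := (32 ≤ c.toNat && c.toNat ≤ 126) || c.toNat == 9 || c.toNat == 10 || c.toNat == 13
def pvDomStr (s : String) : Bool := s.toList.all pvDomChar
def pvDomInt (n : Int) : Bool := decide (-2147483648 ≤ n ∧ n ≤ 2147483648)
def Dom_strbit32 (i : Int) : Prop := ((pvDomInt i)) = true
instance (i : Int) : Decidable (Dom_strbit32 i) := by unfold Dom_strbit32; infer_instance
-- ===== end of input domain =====

-- B replaces A's 32-step per-bit masking loop by one 32-bit mask and 8 nibble lookups in a
-- 16-entry table joined with ' ' (objective: faster by a constant factor).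

-- ===== PORT A =====
-- A's `res` string accumulator is carried as a `List Char` (PySem convention: string
-- concatenation is ported on the `List Char` side), turned into a `String` on return.
def strbit32 (i : Int) : String :=
  String.ofList
    ((PySem.List.pyRange 0 32 1).foldl
      (fun (st : List Char × Int) b =>
        (st.1 ++ (if 0 < PySem.Int.band st.2 i then ['1'] else ['0'])
              ++ (if PySem.Int.mod (b + 1) 4 = 0 ∧ b < 31 then [' '] else []),
         st.2 >>> (1 : Nat)))
      (([] : List Char), (1 : Int) <<< (31 : Nat))).1

-- ===== PORT B =====
-- the tuple _NIB of Source B, each 4-character entry as a list of chars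
def pvNib : List (List Char) :=
  [['0', '0', '0', '0'],
   ['0', '0', '0', '1'],
   ['0', '0', '1', '0'],
   ['0', '0', '1', '1'],
   ['0', '1', '0', '0'],
   ['0', '1', '0', '1'],
   ['0', '1', '1', '0'],
   ['0', '1', '1', '1'],
   ['1', '0', '0', '0'],
   ['1', '0', '0', '1'],
   ['1', '0', '1', '0'],
   ['1', '0', '1', '1'],
   ['1', '1', '0', '0'],
   ['1', '1', '0', '1'],
   ['1', '1', '1', '0'],
   ['1', '1', '1', '1']]

-- tuple indexing _NIB[…] is ported with pyGet?; the index (n >> s) & 0xF is always < 16,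
-- so the IndexError branch (`none`, defaulted to []) is unreachable.
def strbit32_alt (i : Int) : String :=
  let n : Int := PySem.Int.band i 4294967295
  String.ofList
    (PySem.Chars.join [' ']
      ((PySem.List.pyRange 28 (-4) (-4)).map
        (fun s => (PySem.List.pyGet? pvNib (PySem.Int.band (n >>> s.toNat) 15)).getD [])))

-- ===== PRECONDITION & SPEC =====
def Spec_strbit32 (i : Int) (out : String) : Prop := out = strbit32_alt i
instance (i : Int) (out : String) : Decidable (Spec_strbit32 i out) := by unfold Spec_strbit32; infer_instance

-- ===== CLAIM (what is proved, stated in full; the proofs are below) =====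
def Claim_equal_strbit32 : Prop := ∀ (i : Int), Dom_strbit32 i → Spec_strbit32 i (strbit32 i)

-- ===== LEMMAS AND PROOFS =====

theorem pv_two_pow_and (k m : Nat) : 2 ^ k &&& m = if m.testBit k then 2 ^ k else 0 := by
  rw [Nat.and_comm, Nat.and_two_pow]
  cases h : m.testBit k <;> simp

-- bit k of Python's `moveb & i` test, read off the low-32-bit masked value
theorem pvBitA (i : Int) (k : Nat) (hk : k < 32) :
    (0 < PySem.Int.band ((2:Int) ^ k) i) ↔
      ((PySem.Int.band i 4294967295).toNat.testBit k = true) := by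
  have h2k : (0:Int) ≤ 2 ^ k := by positivity
  have hc : ((2:Int) ^ k).toNat = 2 ^ k := by
    rw [show ((2:Int) ^ k) = ((2 ^ k : Nat) : Int) by push_cast; ring, Int.toNat_natCast]
  have hm : ((4294967295 : Int)).toNat = 2 ^ 32 - 1 := by decide
  by_cases hi : (0:Int) ≤ i
  · simp only [PySem.Int.band, if_pos h2k, if_pos hi,
      if_pos (show (0:Int) ≤ 4294967295 by norm_num), hc, hm, Int.toNat_natCast,
      pv_two_pow_and, Nat.testBit_and, Nat.testBit_two_pow_sub_one]
    cases h : i.toNat.testBit k <;> simp [hk]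
  · simp only [PySem.Int.band, if_pos h2k, if_neg hi,
      if_pos (show (0:Int) ≤ 4294967295 by norm_num), hc, hm, Int.toNat_natCast,
      pv_two_pow_and]
    have hmod : (-i - 1).toNat % 2 ^ 32 < 2 ^ 32 := Nat.mod_lt _ (by norm_num)
    have hsub : 2 ^ 32 - 1 - ((-i - 1).toNat % 2 ^ 32) = 2 ^ 32 - (((-i - 1).toNat % 2 ^ 32) + 1) := by
      omega
    rw [Nat.and_comm, Nat.and_two_pow_sub_one_eq_mod, hsub,
      Nat.testBit_two_pow_sub_succ hmod, Nat.testBit_mod_two_pow]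
    cases h : (-i - 1).toNat.testBit k <;> simp [hk]

-- one nibble lookup yields exactly the characters of bits s+3 … s
theorem pvNibGet (x s : Nat) :
    (PySem.List.pyGet? pvNib (PySem.Int.band (((x : Nat) : Int) >>> ((s : Nat) : Int)) 15)).getD []
      = [if x.testBit (s + 3) then '1' else '0', if x.testBit (s + 2) then '1' else '0',
         if x.testBit (s + 1) then '1' else '0', if x.testBit s then '1' else '0'] := by
  rw [Int.shiftRight_natCast_right,
    show ((x : Int) >>> s) = (((x >>> s : Nat) : Int)) from (Int.natCast_shiftRight x s).symm,
    show (15:Int) = ((15:Nat):Int) from rfl, PySem.Int.band_natCast, PySem.List.pyGet?_natCast]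
  have hlt : (x >>> s) &&& 15 < 16 := Nat.lt_succ_of_le Nat.and_le_right
  have htab : ∀ y, y < 16 → (pvNib[y]?).getD ([] : List Char)
      = [if y.testBit 3 then '1' else '0', if y.testBit 2 then '1' else '0',
         if y.testBit 1 then '1' else '0', if y.testBit 0 then '1' else '0'] := by decide
  rw [htab _ hlt]
  have hb : ∀ j, j < 4 → ((x >>> s) &&& 15).testBit j = x.testBit (s + j) := by
    intro j hj
    have h15t : (15:Nat).testBit j = true := by interval_cases j <;> decide
    simp [Nat.testBit_and, Nat.testBit_shiftRight, h15t]
  rw [hb 3 (by omega), hb 2 (by omega), hb 1 (by omega), hb 0 (by omega)]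
  simp

theorem pvM31 : ((1:Int) <<< (31:Nat)) = 2 ^ 31 := by decide
theorem pvM30 : ((2:Int) ^ 31) >>> (1:Nat) = 2 ^ 30 := by decide
theorem pvM29 : ((2:Int) ^ 30) >>> (1:Nat) = 2 ^ 29 := by decide
theorem pvM28 : ((2:Int) ^ 29) >>> (1:Nat) = 2 ^ 28 := by decide
theorem pvM27 : ((2:Int) ^ 28) >>> (1:Nat) = 2 ^ 27 := by decide
theorem pvM26 : ((2:Int) ^ 27) >>> (1:Nat) = 2 ^ 26 := by decide
theorem pvM25 : ((2:Int) ^ 26) >>> (1:Nat) = 2 ^ 25 := by decide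
theorem pvM24 : ((2:Int) ^ 25) >>> (1:Nat) = 2 ^ 24 := by decide
theorem pvM23 : ((2:Int) ^ 24) >>> (1:Nat) = 2 ^ 23 := by decide
theorem pvM22 : ((2:Int) ^ 23) >>> (1:Nat) = 2 ^ 22 := by decide
theorem pvM21 : ((2:Int) ^ 22) >>> (1:Nat) = 2 ^ 21 := by decide
theorem pvM20 : ((2:Int) ^ 21) >>> (1:Nat) = 2 ^ 20 := by decide
theorem pvM19 : ((2:Int) ^ 20) >>> (1:Nat) = 2 ^ 19 := by decide
theorem pvM18 : ((2:Int) ^ 19) >>> (1:Nat) = 2 ^ 18 := by decide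
theorem pvM17 : ((2:Int) ^ 18) >>> (1:Nat) = 2 ^ 17 := by decide
theorem pvM16 : ((2:Int) ^ 17) >>> (1:Nat) = 2 ^ 16 := by decide
theorem pvM15 : ((2:Int) ^ 16) >>> (1:Nat) = 2 ^ 15 := by decide
theorem pvM14 : ((2:Int) ^ 15) >>> (1:Nat) = 2 ^ 14 := by decide
theorem pvM13 : ((2:Int) ^ 14) >>> (1:Nat) = 2 ^ 13 := by decide
theorem pvM12 : ((2:Int) ^ 13) >>> (1:Nat) = 2 ^ 12 := by decide
theorem pvM11 : ((2:Int) ^ 12) >>> (1:Nat) = 2 ^ 11 := by decide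
theorem pvM10 : ((2:Int) ^ 11) >>> (1:Nat) = 2 ^ 10 := by decide
theorem pvM9 : ((2:Int) ^ 10) >>> (1:Nat) = 2 ^ 9 := by decide
theorem pvM8 : ((2:Int) ^ 9) >>> (1:Nat) = 2 ^ 8 := by decide
theorem pvM7 : ((2:Int) ^ 8) >>> (1:Nat) = 2 ^ 7 := by decide
theorem pvM6 : ((2:Int) ^ 7) >>> (1:Nat) = 2 ^ 6 := by decide
theorem pvM5 : ((2:Int) ^ 6) >>> (1:Nat) = 2 ^ 5 := by decide
theorem pvM4 : ((2:Int) ^ 5) >>> (1:Nat) = 2 ^ 4 := by decide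
theorem pvM3 : ((2:Int) ^ 4) >>> (1:Nat) = 2 ^ 3 := by decide
theorem pvM2 : ((2:Int) ^ 3) >>> (1:Nat) = 2 ^ 2 := by decide
theorem pvM1 : ((2:Int) ^ 2) >>> (1:Nat) = 2 ^ 1 := by decide
theorem pvM0 : ((2:Int) ^ 1) >>> (1:Nat) = 2 ^ 0 := by decide

theorem pvT28 : ((28:Int)).toNat = 28 := rfl
theorem pvT24 : ((24:Int)).toNat = 24 := rfl
theorem pvT20 : ((20:Int)).toNat = 20 := rfl
theorem pvT16 : ((16:Int)).toNat = 16 := rfl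
theorem pvT12 : ((12:Int)).toNat = 12 := rfl
theorem pvT8 : ((8:Int)).toNat = 8 := rfl
theorem pvT4 : ((4:Int)).toNat = 4 := rfl
theorem pvT0 : ((0:Int)).toNat = 0 := rfl

theorem pv_ite_singleton (p : Prop) [Decidable p] (a c : Char) :
    (if p then [a] else [c]) = [if p then a else c] := by
  split <;> rfl

-- ===== VERDICT (by name: the statement is the Claim_ definition above) =====
theorem strbit32_spec : Claim_equal_strbit32 := by
  intro i _
  unfold Spec_strbit32
  have hnn : (0:Int) ≤ PySem.Int.band i 4294967295 := by
    rw [PySem.Int.band_comm]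
    exact PySem.Int.band_nonneg_of_nonneg_left _ (by norm_num)
  obtain ⟨t, hn⟩ : ∃ t : Nat, PySem.Int.band i 4294967295 = ((t : Nat) : Int) :=
    ⟨_, (Int.toNat_of_nonneg hnn).symm⟩
  have hrA : PySem.List.pyRange 0 32 1 = [0, 1, 2, 3, 4, 5, 6, 7, 8, 9, 10, 11, 12, 13, 14, 15, 16, 17, 18, 19, 20, 21, 22, 23, 24, 25, 26, 27, 28, 29, 30, 31] := by decide
  have hrB : PySem.List.pyRange 28 (-4) (-4) = [28, 24, 20, 16, 12, 8, 4, 0] := by decide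
  simp only [strbit32, strbit32_alt, hrA, hrB, List.foldl_cons, List.foldl_nil,
    List.map_cons, List.map_nil, pvM31, pvM30, pvM29, pvM28, pvM27, pvM26, pvM25, pvM24, pvM23, pvM22, pvM21, pvM20, pvM19, pvM18, pvM17, pvM16, pvM15, pvM14, pvM13, pvM12, pvM11, pvM10, pvM9, pvM8, pvM7, pvM6, pvM5, pvM4, pvM3, pvM2, pvM1, pvM0, pvT28, pvT24, pvT20, pvT16, pvT12, pvT8, pvT4, pvT0,
    pvBitA i 31 (by omega), pvBitA i 30 (by omega), pvBitA i 29 (by omega), pvBitA i 28 (by omega), pvBitA i 27 (by omega), pvBitA i 26 (by omega), pvBitA i 25 (by omega), pvBitA i 24 (by omega), pvBitA i 23 (by omega), pvBitA i 22 (by omega), pvBitA i 21 (by omega), pvBitA i 20 (by omega), pvBitA i 19 (by omega), pvBitA i 18 (by omega), pvBitA i 17 (by omega), pvBitA i 16 (by omega), pvBitA i 15 (by omega), pvBitA i 14 (by omega), pvBitA i 13 (by omega), pvBitA i 12 (by omega), pvBitA i 11 (by omega), pvBitA i 10 (by omega), pvBitA i 9 (by omega), pvBitA i 8 (by omega), pvBitA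 i 7 (by omega), pvBitA i 6 (by omega), pvBitA i 5 (by omega), pvBitA i 4 (by omega), pvBitA i 3 (by omega), pvBitA i 2 (by omega), pvBitA i 1 (by omega), pvBitA i 0 (by omega), hn, Int.toNat_natCast, pvNibGet]
  simp only [(show ¬(PySem.Int.mod ((0:Int) + 1) 4 = 0 ∧ (0:Int) < 31) by decide),
    (show ¬(PySem.Int.mod ((1:Int) + 1) 4 = 0 ∧ (1:Int) < 31) by decide),
    (show ¬(PySem.Int.mod ((2:Int) + 1) 4 = 0 ∧ (2:Int) < 31) by decide),
    (show (PySem.Int.mod ((3:Int) + 1) 4 = 0 ∧ (3:Int) < 31) by decide),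
    (show ¬(PySem.Int.mod ((4:Int) + 1) 4 = 0 ∧ (4:Int) < 31) by decide),
    (show ¬(PySem.Int.mod ((5:Int) + 1) 4 = 0 ∧ (5:Int) < 31) by decide),
    (show ¬(PySem.Int.mod ((6:Int) + 1) 4 = 0 ∧ (6:Int) < 31) by decide),
    (show (PySem.Int.mod ((7:Int) + 1) 4 = 0 ∧ (7:Int) < 31) by decide),
    (show ¬(PySem.Int.mod ((8:Int) + 1) 4 = 0 ∧ (8:Int) < 31) by decide),
    (show ¬(PySem.Int.mod ((9:Int) + 1) 4 = 0 ∧ (9:Int) < 31) by decide),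
    (show ¬(PySem.Int.mod ((10:Int) + 1) 4 = 0 ∧ (10:Int) < 31) by decide),
    (show (PySem.Int.mod ((11:Int) + 1) 4 = 0 ∧ (11:Int) < 31) by decide),
    (show ¬(PySem.Int.mod ((12:Int) + 1) 4 = 0 ∧ (12:Int) < 31) by decide),
    (show ¬(PySem.Int.mod ((13:Int) + 1) 4 = 0 ∧ (13:Int) < 31) by decide),
    (show ¬(PySem.Int.mod ((14:Int) + 1) 4 = 0 ∧ (14:Int) < 31) by decide),
    (show (PySem.Int.mod ((15:Int) + 1) 4 = 0 ∧ (15:Int) < 31) by decide),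
    (show ¬(PySem.Int.mod ((16:Int) + 1) 4 = 0 ∧ (16:Int) < 31) by decide),
    (show ¬(PySem.Int.mod ((17:Int) + 1) 4 = 0 ∧ (17:Int) < 31) by decide),
    (show ¬(PySem.Int.mod ((18:Int) + 1) 4 = 0 ∧ (18:Int) < 31) by decide),
    (show (PySem.Int.mod ((19:Int) + 1) 4 = 0 ∧ (19:Int) < 31) by decide),
    (show ¬(PySem.Int.mod ((20:Int) + 1) 4 = 0 ∧ (20:Int) < 31) by decide),
    (show ¬(PySem.Int.mod ((21:Int) + 1) 4 = 0 ∧ (21:Int) < 31) by decide),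
    (show ¬(PySem.Int.mod ((22:Int) + 1) 4 = 0 ∧ (22:Int) < 31) by decide),
    (show (PySem.Int.mod ((23:Int) + 1) 4 = 0 ∧ (23:Int) < 31) by decide),
    (show ¬(PySem.Int.mod ((24:Int) + 1) 4 = 0 ∧ (24:Int) < 31) by decide),
    (show ¬(PySem.Int.mod ((25:Int) + 1) 4 = 0 ∧ (25:Int) < 31) by decide),
    (show ¬(PySem.Int.mod ((26:Int) + 1) 4 = 0 ∧ (26:Int) < 31) by decide),
    (show (PySem.Int.mod ((27:Int) + 1) 4 = 0 ∧ (27:Int) < 31) by decide),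
    (show ¬(PySem.Int.mod ((28:Int) + 1) 4 = 0 ∧ (28:Int) < 31) by decide),
    (show ¬(PySem.Int.mod ((29:Int) + 1) 4 = 0 ∧ (29:Int) < 31) by decide),
    (show ¬(PySem.Int.mod ((30:Int) + 1) 4 = 0 ∧ (30:Int) < 31) by decide),
    (show ¬(PySem.Int.mod ((31:Int) + 1) 4 = 0 ∧ (31:Int) < 31) by decide), and_self, if_true, if_false]
  simp [PySem.Chars.join, List.intercalate, List.intersperse, pv_ite_singleton]
  rfl
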